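-- pv_equiv track=rewrite | github.com/Eon-Labs/gapless-crypto-data | docs/ultrathink/validation/help_snapshotter.py | _extract_docstring_from_help
-- ===== SOURCE A (Python) =====
-- def _extract_docstring_from_help(help_output: str) -> str:
--     """Extract docstring content from help output."""
--     lines = help_output.splitlines()
--     docstring_lines = []
--     in_docstring = False
--
--     for line in lines:
--         # Start of docstring is typically after a blank line following the signature
--         if not in_docstring and line.strip() == "" and docstring_lines:
--             continue
--
--         # Skip header lines
--         if line.strip().startswith("Help on") or line.strip().startswith("class") or line.strip().startswith("method"):
--             continue
--
--         # Detect end of docstring (methods, attributes, etc.)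
--         if line.strip().startswith("Methods") or line.strip().startswith("Attributes") or line.strip().startswith("Data"):
--             break
--
--         if line.strip():
--             in_docstring = True
--             docstring_lines.append(line)
--
--     return "\n".join(docstring_lines)
-- ===== SOURCE B (Python) =====
-- def _extract_docstring_from_help(help_output: str) -> str:
--     """Extract docstring content from help output."""
--     lines = help_output.splitlines()
--     # Pass 1: locate the boundary (first Methods/Attributes/Data line).
--     boundary = next(
--         (i for i, line in enumerate(lines)
--          if line.strip().startswith(("Methods", "Attributes", "Data"))),
--         len(lines),
--     )
--     # Pass 2: filter the prefix before the boundary.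
--     kept = [
--         line for line in lines[:boundary]
--         if line.strip()
--         and not line.strip().startswith(("Help on", "class", "method"))
--     ]
--     return "\n".join(kept)
-- ===== Notes on version B (the rewrite author's own statement) =====
-- stated objective: simpler
-- what changed: Replaces the single stateful scan (in_docstring flag, continue/break interleaved) by two shaped passes: first find the boundary index of the first Methods/Attributes/Data line, then filter the prefix before it with a comprehension; the dead in_docstring blank-line branch disappears.
import Mathlib
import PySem

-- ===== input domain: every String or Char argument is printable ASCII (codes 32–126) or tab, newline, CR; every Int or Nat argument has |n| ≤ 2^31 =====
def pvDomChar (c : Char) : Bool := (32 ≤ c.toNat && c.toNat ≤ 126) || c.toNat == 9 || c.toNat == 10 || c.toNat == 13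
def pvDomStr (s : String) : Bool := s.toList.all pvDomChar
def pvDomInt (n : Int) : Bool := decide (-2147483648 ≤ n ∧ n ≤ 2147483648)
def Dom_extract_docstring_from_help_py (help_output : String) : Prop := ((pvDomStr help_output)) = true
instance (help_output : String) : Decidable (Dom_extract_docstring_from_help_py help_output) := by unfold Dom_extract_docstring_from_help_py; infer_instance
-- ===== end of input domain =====

-- B replaces A's single stateful scan (flag + continue + break) with boundary-then-filter two passes (objective: simpler).

-- ===== PORT A =====
-- the for-loop of A: state = (docstring_lines, in_docstring), break returns the accumulator
def pvLoopA : List String → List String → Bool → List String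
  | [], acc, _ => acc
  | line :: rest, acc, inDoc =>
    if !inDoc && (PySem.Str.strip line == "") && !acc.isEmpty then
      pvLoopA rest acc inDoc
    else if PySem.Str.startswith (PySem.Str.strip line) "Help on"
        || PySem.Str.startswith (PySem.Str.strip line) "class"
        || PySem.Str.startswith (PySem.Str.strip line) "method" then
      pvLoopA rest acc inDoc
    else if PySem.Str.startswith (PySem.Str.strip line) "Methods"
        || PySem.Str.startswith (PySem.Str.strip line) "Attributes"
        || PySem.Str.startswith (PySem.Str.strip line) "Data" then
      acc
    else if !(PySem.Str.strip line == "") then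
      pvLoopA rest (acc ++ [line]) true
    else
      pvLoopA rest acc inDoc

def extract_docstring_from_help_py (help_output : String) : String :=
  PySem.Str.join "\n" (pvLoopA (PySem.Str.splitlines help_output) [] false)

-- ===== PORT B =====
def pvStopB (line : String) : Bool :=
  PySem.Str.startswith (PySem.Str.strip line) "Methods"
  || PySem.Str.startswith (PySem.Str.strip line) "Attributes"
  || PySem.Str.startswith (PySem.Str.strip line) "Data"

def pvKeepB (line : String) : Bool :=
  !(PySem.Str.strip line == "")
  && !(PySem.Str.startswith (PySem.Str.strip line) "Help on"
       || PySem.Str.startswith (PySem.Str.strip line) "class"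
       || PySem.Str.startswith (PySem.Str.strip line) "method")

def extract_docstring_from_help_py_alt (help_output : String) : String :=
  let lines := PySem.Str.splitlines help_output
  let boundary := lines.findIdx pvStopB
  let kept := (lines.take boundary).filter pvKeepB
  PySem.Str.join "\n" kept

-- ===== PRECONDITION & SPEC =====
def Spec_extract_docstring_from_help_py (help_output : String) (out : String) : Prop := out = extract_docstring_from_help_py_alt help_output
instance (help_output : String) (out : String) : Decidable (Spec_extract_docstring_from_help_py help_output out) := by unfold Spec_extract_docstring_from_help_py; infer_instance

-- ===== CLAIM (what is proved, stated in full; the proofs are below) =====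
def Claim_equal_extract_docstring_from_help_py : Prop := ∀ (help_output : String), Dom_extract_docstring_from_help_py help_output → Spec_extract_docstring_from_help_py help_output (extract_docstring_from_help_py help_output)

-- ===== LEMMAS AND PROOFS =====

-- a char list starting with a nonempty prefix has that prefix's head character
lemma pv_head_of_startswith (cs : List Char) (c : Char) (p : List Char)
    (h : PySem.Chars.startswith cs (c :: p) = true) : cs.head? = some c := by
  rw [PySem.Chars.startswith_iff] at h
  obtain ⟨t, ht⟩ := h
  rw [← ht]
  rfl

-- prefixes with different first characters exclude each other
lemma pv_sw_false_of_head (cs : List Char) (c d : Char) (p q : List Char) (hcd : c ≠ d)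
    (h : PySem.Chars.startswith cs (c :: p) = true) :
    PySem.Chars.startswith cs (d :: q) = false := by
  cases hq : PySem.Chars.startswith cs (d :: q) with
  | false => rfl
  | true =>
    have h1 := pv_head_of_startswith cs c p h
    have h2 := pv_head_of_startswith cs d q hq
    rw [h1] at h2
    exact absurd (Option.some.inj h2) hcd

-- a stop line (Methods/Attributes/Data) is never a header line (Help on/class/method)
lemma pv_stop_not_header (line : String) (h : pvStopB line = true) :
    (PySem.Str.startswith (PySem.Str.strip line) "Help on"
      || PySem.Str.startswith (PySem.Str.strip line) "class"
      || PySem.Str.startswith (PySem.Str.strip line) "method") = false := by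
  unfold pvStopB at h
  have hM : ("Methods" : String).toList = 'M' :: "ethods".toList := by decide
  have hA : ("Attributes" : String).toList = 'A' :: "ttributes".toList := by decide
  have hD : ("Data" : String).toList = 'D' :: "ata".toList := by decide
  have hH : ("Help on" : String).toList = 'H' :: "elp on".toList := by decide
  have hc : ("class" : String).toList = 'c' :: "lass".toList := by decide
  have hm : ("method" : String).toList = 'm' :: "ethod".toList := by decide
  simp only [PySem.Str.startswith_eq, Bool.or_eq_true, hM, hA, hD] at h
  simp only [PySem.Str.startswith_eq, Bool.or_eq_false_iff, hH, hc, hm]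
  rcases h with (h1 | h2) | h3
  · exact ⟨⟨pv_sw_false_of_head _ _ _ _ _ (by decide) h1, pv_sw_false_of_head _ _ _ _ _ (by decide) h1⟩,
      pv_sw_false_of_head _ _ _ _ _ (by decide) h1⟩
  · exact ⟨⟨pv_sw_false_of_head _ _ _ _ _ (by decide) h2, pv_sw_false_of_head _ _ _ _ _ (by decide) h2⟩,
      pv_sw_false_of_head _ _ _ _ _ (by decide) h2⟩
  · exact ⟨⟨pv_sw_false_of_head _ _ _ _ _ (by decide) h3, pv_sw_false_of_head _ _ _ _ _ (by decide) h3⟩,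
      pv_sw_false_of_head _ _ _ _ _ (by decide) h3⟩

-- A's loop equals B's take/filter on any state
lemma pvLoopA_eq (lines : List String) : ∀ (acc : List String) (flag : Bool),
    pvLoopA lines acc flag = acc ++ (lines.take (lines.findIdx pvStopB)).filter pvKeepB := by
  induction lines with
  | nil => intro acc flag; simp [pvLoopA]
  | cons line rest ih =>
    intro acc flag
    simp only [pvLoopA]
    split_ifs with h1 h2 h3 h4
    · -- blank line skipped by the in_docstring branch
      have hsE : PySem.Str.strip line = "" := by
        simp only [Bool.and_eq_true, beq_iff_eq, Bool.not_eq_true'] at h1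
        exact h1.1.2
      have hstopf : pvStopB line = false := by unfold pvStopB; rw [hsE]; decide
      have hkeep : pvKeepB line = false := by unfold pvKeepB; rw [hsE]; decide
      simp [List.findIdx_cons, hstopf, hkeep, ih acc flag]
    · -- header line skipped
      have hstopf : pvStopB line = false := by
        cases hq : pvStopB line with
        | false => rfl
        | true => rw [pv_stop_not_header line hq] at h2; exact absurd h2 (by decide)
      have hkeep : pvKeepB line = false := by unfold pvKeepB; rw [h2]; simp
      simp [List.findIdx_cons, hstopf, hkeep, ih acc flag]
    · -- stop line: break
      have hstopt : pvStopB line = true := by unfold pvStopB; exact h3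
      simp [List.findIdx_cons, hstopt]
    · -- kept line
      have hstopf : pvStopB line = false := by
        unfold pvStopB
        cases hq : (PySem.Str.startswith (PySem.Str.strip line) "Methods"
            || PySem.Str.startswith (PySem.Str.strip line) "Attributes"
            || PySem.Str.startswith (PySem.Str.strip line) "Data") with
        | false => rfl
        | true => exact absurd hq h3
      have hkeep : pvKeepB line = true := by
        unfold pvKeepB
        have hh : (PySem.Str.startswith (PySem.Str.strip line) "Help on"
            || PySem.Str.startswith (PySem.Str.strip line) "class"
            || PySem.Str.startswith (PySem.Str.strip line) "method") = false := by
          cases hq : (PySem.Str.startswith (PySem.Str.strip line) "Help on"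
              || PySem.Str.startswith (PySem.Str.strip line) "class"
              || PySem.Str.startswith (PySem.Str.strip line) "method") with
          | false => rfl
          | true => exact absurd hq h2
        rw [hh, h4]
        decide
      rw [ih (acc ++ [line]) true]
      simp [List.findIdx_cons, hstopf, hkeep]
    · -- blank line, flag branch not taken
      have hsB : (PySem.Str.strip line == "") = true := by
        revert h4
        cases (PySem.Str.strip line == "") <;> simp
      have hsE : PySem.Str.strip line = "" := by simpa using hsB
      have hstopf : pvStopB line = false := by unfold pvStopB; rw [hsE]; decide
      have hkeep : pvKeepB line = false := by unfold pvKeepB; rw [hsE]; decide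
      simp [List.findIdx_cons, hstopf, hkeep, ih acc flag]

-- ===== VERDICT (by name: the statement is the Claim_ definition above) =====
theorem extract_docstring_from_help_py_spec : Claim_equal_extract_docstring_from_help_py := by
  intro help_output _
  unfold Spec_extract_docstring_from_help_py extract_docstring_from_help_py extract_docstring_from_help_py_alt
  rw [pvLoopA_eq]
  simp
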